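-- pv_equiv track=rewrite | github.com/daniel-reich/ubiquitous-fiesta | uWpS5xMjzZFAkiQzL_21.py | odds_vs_evens
-- ===== SOURCE A (Python) =====
-- def odds_vs_evens(num):
--   num = str(num)
--   odd, even = [] , []
--   for n in num:
--     if int(n)%2==0:
--       even.append(int(n))
--     else:
--       odd.append(int(n))
--   return "odd" if sum(odd)>sum(even) else "even" if sum(even)>sum(odd) else "equal"
-- ===== SOURCE B (Python) =====
-- def odds_vs_evens(num):
--     n = -num if num < 0 else num
--     diff = 0
--     while n > 0:
--         d = n % 10
--         diff += d if d % 2 == 1 else -d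
--         n //= 10
--     return "odd" if diff > 0 else "even" if diff < 0 else "equal"
-- ===== Notes on version B (the rewrite author's own statement) =====
-- stated objective: alternative
-- what changed: B extracts digits arithmetically with divmod on the number and keeps one running signed accumulator (odd adds, even subtracts), instead of converting to a string, parsing each character back with int() and building two lists to sum at the end.
import Mathlib
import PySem

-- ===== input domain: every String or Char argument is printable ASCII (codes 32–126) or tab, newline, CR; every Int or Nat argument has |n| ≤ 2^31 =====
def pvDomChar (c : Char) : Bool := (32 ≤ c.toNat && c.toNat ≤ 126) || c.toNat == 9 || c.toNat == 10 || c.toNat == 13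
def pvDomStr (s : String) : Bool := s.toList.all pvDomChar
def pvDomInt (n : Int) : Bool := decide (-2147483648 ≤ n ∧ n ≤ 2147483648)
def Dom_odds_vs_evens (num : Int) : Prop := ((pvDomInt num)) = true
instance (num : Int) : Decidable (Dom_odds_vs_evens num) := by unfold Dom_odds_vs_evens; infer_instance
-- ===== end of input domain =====

-- B replaces A's string conversion + two digit lists with arithmetic digit extraction
-- and a single signed accumulator (alternative decomposition, same cost).


-- ===== PORT A =====
-- one loop step: int(n) on the character (exact: on Pre_ every character is a digit,
-- so getD 0 is never consulted), then append to even or odd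
def aStep (p : List Int × List Int) (c : Char) : List Int × List Int :=
  let d := (PySem.Int.ofStr? (String.singleton c)).getD 0
  if PySem.Int.mod d 2 == 0 then (p.1, p.2 ++ [d]) else (p.1 ++ [d], p.2)

def odds_vs_evens (num : Int) : String :=
  let s := PySem.Int.toStr num
  let oe := s.toList.foldl aStep ([], [])
  if oe.1.sum > oe.2.sum then "odd"
  else if oe.2.sum > oe.1.sum then "even"
  else "equal"

-- ===== PORT B =====
-- Source B's while loop; n is a nonnegative int throughout, so it is carried as a Nat
-- (Python's % and // on nonnegative operands agree with Nat.mod / Nat.div)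
def bLoop (n : Nat) (diff : Int) : Int :=
  if n = 0 then diff
  else bLoop (n / 10)
    (diff + (if n % 10 % 2 == 1 then ((n % 10 : Nat) : Int) else -((n % 10 : Nat) : Int)))
termination_by n
decreasing_by exact Nat.div_lt_self (Nat.pos_of_ne_zero (by assumption)) (by norm_num)

def odds_vs_evens_alt (num : Int) : String :=
  let n : Nat := (if num < 0 then -num else num).toNat
  let diff := bLoop n 0
  if diff > 0 then "odd"
  else if diff < 0 then "even"
  else "equal"

-- ===== PRECONDITION & SPEC =====
-- Pre_ excludes negative num, on which A raises ValueError (int('-') on the sign char).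
def Pre_odds_vs_evens (num : Int) : Prop := 0 ≤ num
instance (num : Int) : Decidable (Pre_odds_vs_evens num) := by unfold Pre_odds_vs_evens; infer_instance
def pvWitness_odds_vs_evens : Int := 1234

def Spec_odds_vs_evens (num : Int) (out : String) : Prop := out = odds_vs_evens_alt num
instance (num : Int) (out : String) : Decidable (Spec_odds_vs_evens num out) := by unfold Spec_odds_vs_evens; infer_instance

-- ===== CLAIM (what is proved, stated in full; the proofs are below) =====
def Claim_equal_odds_vs_evens : Prop := ∀ (num : Int), Dom_odds_vs_evens num → Pre_odds_vs_evens num → Spec_odds_vs_evens num (odds_vs_evens num)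

-- ===== LEMMAS AND PROOFS =====

-- signed weight of one decimal digit: +d if odd, -d if even
def wDig (d : Nat) : Int := if d % 2 == 1 then (d : Int) else -(d : Int)

-- signed weight contributed by one character on A's side
def fChar (c : Char) : Int :=
  if PySem.Int.mod ((PySem.Int.ofStr? (String.singleton c)).getD 0) 2 == 0
  then -((PySem.Int.ofStr? (String.singleton c)).getD 0)
  else (PySem.Int.ofStr? (String.singleton c)).getD 0

theorem fChar_digitChar (d : Nat) (h : d < 10) : fChar (Nat.digitChar d) = wDig d := by
  interval_cases d <;> decide

theorem foldl_aStep_diff (cs : List Char) : ∀ (o e : List Int),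
    ((cs.foldl aStep (o, e)).1.sum - (cs.foldl aStep (o, e)).2.sum)
      = (o.sum - e.sum) + (cs.map fChar).sum := by
  induction cs with
  | nil => intro o e; simp
  | cons c cs ih =>
    intro o e
    simp only [List.foldl_cons, List.map_cons, List.sum_cons]
    rw [show aStep (o, e) c = if PySem.Int.mod ((PySem.Int.ofStr? (String.singleton c)).getD 0) 2 == 0
          then (o, e ++ [(PySem.Int.ofStr? (String.singleton c)).getD 0])
          else (o ++ [(PySem.Int.ofStr? (String.singleton c)).getD 0], e) from rfl]
    by_cases hc : PySem.Int.mod ((PySem.Int.ofStr? (String.singleton c)).getD 0) 2 == 0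
    · rw [if_pos hc, ih]
      unfold fChar
      rw [if_pos hc]
      simp only [List.sum_append, List.sum_cons, List.sum_nil]
      ring
    · rw [if_neg hc, ih]
      unfold fChar
      rw [if_neg hc]
      simp only [List.sum_append, List.sum_cons, List.sum_nil]
      ring

theorem bLoop_zero : bLoop 0 0 = 0 := by
  rw [bLoop]; simp

theorem bLoop_shift (n : Nat) : ∀ (diff : Int), bLoop n diff = diff + bLoop n 0 := by
  induction n using Nat.strong_induction_on with
  | _ n ih =>
    intro diff
    by_cases h : n = 0
    · subst h; rw [bLoop_zero, bLoop]; simp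
    · conv_lhs => rw [bLoop]
      conv_rhs => rw [bLoop]
      rw [if_neg h, if_neg h,
        ih (n / 10) (Nat.div_lt_self (Nat.pos_of_ne_zero h) (by norm_num)),
        ih (n / 10) (Nat.div_lt_self (Nat.pos_of_ne_zero h) (by norm_num)) (0 + _)]
      ring

theorem bLoop_unfold (n : Nat) (h : n ≠ 0) :
    bLoop n 0 = wDig (n % 10) + bLoop (n / 10) 0 := by
  conv_lhs => rw [bLoop]
  rw [if_neg h, bLoop_shift, zero_add]
  simp only [wDig]

theorem toDigitsCore_weight (fuel : Nat) : ∀ (n : Nat) (ds : List Char), n < fuel →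
    ((Nat.toDigitsCore 10 fuel n ds).map fChar).sum
      = wDig (n % 10) + bLoop (n / 10) 0 + (ds.map fChar).sum := by
  induction fuel with
  | zero => intro n ds h; omega
  | succ fuel ih =>
    intro n ds h
    rw [Nat.toDigitsCore]
    by_cases hz : n / 10 = 0
    · rw [if_pos hz, hz, bLoop_zero]
      simp only [List.map_cons, List.sum_cons]
      rw [fChar_digitChar _ (Nat.mod_lt _ (by norm_num))]
      ring
    · rw [if_neg hz]
      have hlt : n / 10 < fuel := by
        have h1 : 0 < n := by
          rcases Nat.eq_zero_or_pos n with h0 | h0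
          · subst h0; simp at hz
          · exact h0
        have := Nat.div_lt_self h1 (show 1 < 10 by norm_num)
        omega
      rw [ih (n / 10) _ hlt]
      simp only [List.map_cons, List.sum_cons]
      rw [fChar_digitChar _ (Nat.mod_lt _ (by norm_num)), bLoop_unfold (n / 10) hz]
      ring

-- the accumulated signed sum over str(n)'s characters equals B's loop result
theorem toDigits_weight_eq_bLoop (n : Nat) :
    ((Nat.toDigits 10 n).map fChar).sum = bLoop n 0 := by
  rw [Nat.toDigits, toDigitsCore_weight (n + 1) n [] (Nat.lt_succ_self n)]
  by_cases h : n = 0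
  · subst h; norm_num [wDig, bLoop_zero]
  · rw [bLoop_unfold n h]; simp

-- ===== VERDICT (by name: the statement is the Claim_ definition above) =====
theorem odds_vs_evens_spec : Claim_equal_odds_vs_evens := by
  intro num _ hpre
  unfold Pre_odds_vs_evens at hpre
  have hneg : ¬ num < 0 := by omega
  have hchars : (PySem.Int.toStr num).toList = Nat.toDigits 10 num.toNat := by
    rw [PySem.Int.toList_toStr, PySem.Int.toChars, if_neg hneg]
  unfold Spec_odds_vs_evens
  simp only [odds_vs_evens, odds_vs_evens_alt, hchars, if_neg hneg]
  have hdiff := foldl_aStep_diff (Nat.toDigits 10 num.toNat) [] []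
  rw [toDigits_weight_eq_bLoop] at hdiff
  simp only [List.sum_nil, sub_zero, zero_add] at hdiff
  split_ifs with h1 h2 h3 h4 h5 <;> first | rfl | omega
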